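-- pv_equiv track=rewrite | github.com/Buddhamon/Chess-Python | Pieces/bishop.py | _diagonal_move
-- ===== SOURCE A (Python) =====
-- def _diagonal_move(r, c, up, left, board_height=8, board_width=8):
--     route = []
--     if up:
--         r_direction = -1
--     else:
--         r_direction = 1
--     if left:
--         c_direction = -1
--     else:
--         c_direction = 1
--     r += r_direction
--     c += c_direction
--     while r >= 0 and c >= 0 and r < board_height and c < board_width:
--         route.append([r, c])
--         r += r_direction
--         c += c_direction
--     return route
-- ===== SOURCE B (Python) =====
-- def _diagonal_move(r, c, up, left, board_height=8, board_width=8):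
--     rd = -1 if up else 1
--     cd = -1 if left else 1
--     r1, c1 = r + rd, c + cd
--     if not (0 <= r1 < board_height and 0 <= c1 < board_width):
--         return []
--     # once on the board, only the edge in the direction of travel can stop us
--     nr = r1 if up else board_height - 1 - r1
--     nc = c1 if left else board_width - 1 - c1
--     n = min(nr, nc)
--     return [[r1 + rd * k, c1 + cd * k] for k in range(n + 1)]
-- ===== Notes on version B (the rewrite author's own statement) =====
-- stated objective: simpler
-- what changed: Replaces A's step-by-step boundary-testing while loop with a closed-form step count (min of the distances to the two edges in the travel direction) and a single list comprehension.
import Mathlib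
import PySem

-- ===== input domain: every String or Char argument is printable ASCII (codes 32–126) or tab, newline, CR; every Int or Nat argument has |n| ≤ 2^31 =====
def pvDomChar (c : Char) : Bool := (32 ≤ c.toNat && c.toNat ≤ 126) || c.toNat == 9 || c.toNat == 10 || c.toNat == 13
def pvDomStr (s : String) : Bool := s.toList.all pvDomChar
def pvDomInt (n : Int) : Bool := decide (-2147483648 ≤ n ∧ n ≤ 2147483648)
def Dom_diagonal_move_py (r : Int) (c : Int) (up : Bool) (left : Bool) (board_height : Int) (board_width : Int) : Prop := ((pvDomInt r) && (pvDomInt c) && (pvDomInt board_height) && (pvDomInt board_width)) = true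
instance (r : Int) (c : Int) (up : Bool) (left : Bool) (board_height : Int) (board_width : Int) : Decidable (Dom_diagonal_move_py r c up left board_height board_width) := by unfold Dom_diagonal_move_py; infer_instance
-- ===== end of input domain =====

-- B replaces A's step-by-step boundary-testing while loop by a closed-form step count
-- (min distance to the two edges in the travel direction) and one comprehension; objective: simpler.

-- ===== PORT A =====
-- A's while loop: append [r,c] and step while on the board.  The direction of travel is
-- determined by `up`, so the measure (distance to the edge ahead) proves termination.
def pvALoop (up left : Bool) (board_height board_width : Int) (r c : Int)
    (route : List (List Int)) : List (List Int) :=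
  if h : r ≥ 0 ∧ c ≥ 0 ∧ r < board_height ∧ c < board_width then
    pvALoop up left board_height board_width
      (r + (if up then -1 else 1)) (c + (if left then -1 else 1)) (route ++ [[r, c]])
  else route
termination_by (if up then r + 1 else board_height - r).toNat
decreasing_by cases up <;> simp_all

def diagonal_move_py (r : Int) (c : Int) (up : Bool) (left : Bool) (board_height : Int) (board_width : Int) : List (List Int) :=
  let r_direction : Int := if up then -1 else 1
  let c_direction : Int := if left then -1 else 1
  pvALoop up left board_height board_width (r + r_direction) (c + c_direction) []

-- ===== PORT B =====
def diagonal_move_py_alt (r : Int) (c : Int) (up : Bool) (left : Bool) (board_height : Int) (board_width : Int) : List (List Int) :=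
  let rd : Int := if up then -1 else 1
  let cd : Int := if left then -1 else 1
  let r1 : Int := r + rd
  let c1 : Int := c + cd
  if 0 ≤ r1 ∧ r1 < board_height ∧ 0 ≤ c1 ∧ c1 < board_width then
    let nr : Int := if up then r1 else board_height - 1 - r1
    let nc : Int := if left then c1 else board_width - 1 - c1
    let n : Int := min nr nc
    (List.range (n.toNat + 1)).map (fun (k : ℕ) => [r1 + rd * (k : Int), c1 + cd * (k : Int)])
  else []

-- ===== PRECONDITION & SPEC =====
def Spec_diagonal_move_py (r : Int) (c : Int) (up : Bool) (left : Bool) (board_height : Int) (board_width : Int) (out : List (List Int)) : Prop := out = diagonal_move_py_alt r c up left board_height board_width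
instance (r : Int) (c : Int) (up : Bool) (left : Bool) (board_height : Int) (board_width : Int) (out : List (List Int)) : Decidable (Spec_diagonal_move_py r c up left board_height board_width out) := by unfold Spec_diagonal_move_py; infer_instance

-- ===== CLAIM (what is proved, stated in full; the proofs are below) =====
def Claim_equal_diagonal_move_py : Prop := ∀ (r : Int) (c : Int) (up : Bool) (left : Bool) (board_height : Int) (board_width : Int), Dom_diagonal_move_py r c up left board_height board_width → Spec_diagonal_move_py r c up left board_height board_width (diagonal_move_py r c up left board_height board_width)

-- ===== LEMMAS AND PROOFS =====

-- Characterisation of A's loop when it starts ON the board: it runs exactly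
-- (min distance-to-edge-ahead) + 1 iterations and appends the diagonal squares.
lemma pvALoop_char (up left : Bool) (H W : Int) :
    ∀ (n : ℕ) (r c : Int) (route : List (List Int)),
      0 ≤ r → r < H → 0 ≤ c → c < W →
      min (if up then r else H - 1 - r) (if left then c else W - 1 - c) = (n : Int) →
      pvALoop up left H W r c route =
        route ++ (List.range (n + 1)).map
          (fun (k : ℕ) => [r + (if up then -1 else 1) * (k : Int),
                           c + (if left then -1 else 1) * (k : Int)]) := by
  intro n
  induction n with
  | zero =>
    intro r c route hr0 hrH hc0 hcW hmin
    have hstop : ¬ (r + (if up then -1 else 1) ≥ 0 ∧ c + (if left then -1 else 1) ≥ 0 ∧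
        r + (if up then -1 else 1) < H ∧ c + (if left then -1 else 1) < W) := by
      rw [min_def] at hmin
      split_ifs at hmin <;> cases up <;> cases left <;> simp_all <;> omega
    rw [pvALoop, dif_pos ⟨hr0, hc0, hrH, hcW⟩, pvALoop, dif_neg hstop]
    simp
  | succ m ih =>
    intro r c route hr0 hrH hc0 hcW hmin
    have hrm : (if up then r else H - 1 - r) ≥ (m : Int) + 1 := by
      have := min_le_left (if up then r else H - 1 - r) (if left then c else W - 1 - c)
      push_cast at hmin ⊢; omega
    have hcm : (if left then c else W - 1 - c) ≥ (m : Int) + 1 := by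
      have := min_le_right (if up then r else H - 1 - r) (if left then c else W - 1 - c)
      push_cast at hmin ⊢; omega
    rw [pvALoop, dif_pos ⟨hr0, hc0, hrH, hcW⟩]
    rw [ih (r + (if up then -1 else 1)) (c + (if left then -1 else 1)) (route ++ [[r, c]])
      (by clear ih; cases up <;> simp_all <;> omega) (by clear ih; cases up <;> simp_all <;> omega)
      (by clear ih; cases left <;> simp_all <;> omega) (by clear ih; cases left <;> simp_all <;> omega)
      (by clear ih; cases up <;> cases left <;> simp_all <;> push_cast at * <;> omega)]
    conv_rhs => rw [List.range_succ_eq_map]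
    rw [List.map_cons, List.map_map, List.append_assoc, List.singleton_append]
    congr 1
    congr 1
    · simp
    · apply List.map_congr_left
      intro k _
      simp only [Function.comp_apply]
      cases up <;> cases left <;> push_cast <;> simp <;> constructor <;> ring

-- ===== VERDICT (by name: the statement is the Claim_ definition above) =====
theorem diagonal_move_py_spec : Claim_equal_diagonal_move_py := by
  intro r c up left H W _
  unfold Spec_diagonal_move_py diagonal_move_py diagonal_move_py_alt
  simp only []
  by_cases h : 0 ≤ r + (if up then (-1:Int) else 1) ∧ r + (if up then (-1:Int) else 1) < H ∧
      0 ≤ c + (if left then (-1:Int) else 1) ∧ c + (if left then (-1:Int) else 1) < W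
  · rw [if_pos h]
    obtain ⟨h1, h2, h3, h4⟩ := h
    have hn0 : 0 ≤ min (if up then r + (if up then (-1:Int) else 1) else H - 1 - (r + (if up then (-1:Int) else 1)))
        (if left then c + (if left then (-1:Int) else 1) else W - 1 - (c + (if left then (-1:Int) else 1))) :=
      le_min (by cases up <;> simp_all <;> omega) (by cases left <;> simp_all <;> omega)
    rw [pvALoop_char up left H W
      (min (if up then r + (if up then (-1:Int) else 1) else H - 1 - (r + (if up then (-1:Int) else 1)))
        (if left then c + (if left then (-1:Int) else 1) else W - 1 - (c + (if left then (-1:Int) else 1)))).toNat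
      _ _ [] h1 h2 h3 h4 (by omega)]
    simp
  · rw [if_neg h, pvALoop, dif_neg]
    rintro ⟨a1, a2, a3, a4⟩
    exact h ⟨a1, a3, a2, a4⟩
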